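-- pv_equiv track=rewrite | github.com/shanziSZ/MMQL | dataset_SLAKE_group.py | map_entry
-- ===== SOURCE A (Python) =====
-- def map_entry(entries):
--     entry_map = {}
--     for k,v in entries.items():
--         image_id = v['image_name']
--         if image_id in entry_map:
--             pass
--         else:
--             entry_map[image_id] = {}
--             entry_map[image_id]['meta_data'] = []
--         entry_map[image_id]['meta_data'].append(v)
--     return entry_map
-- ===== SOURCE B (Python) =====
-- def map_entry(entries):
--     vals = list(entries.values())
--     names = []
--     for v in vals:
--         n = v['image_name']
--         if n not in names:
--             names.append(n)
--     return {n: {'meta_data': [v for v in vals if v['image_name'] == n]} for n in names}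
-- ===== Notes on version B (the rewrite author's own statement) =====
-- stated objective: alternative
-- what changed: B collects the distinct image names in first-occurrence order and then builds each group by filtering the value list per name, instead of A's single pass that inserts into and appends inside a nested dict.
import Mathlib
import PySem

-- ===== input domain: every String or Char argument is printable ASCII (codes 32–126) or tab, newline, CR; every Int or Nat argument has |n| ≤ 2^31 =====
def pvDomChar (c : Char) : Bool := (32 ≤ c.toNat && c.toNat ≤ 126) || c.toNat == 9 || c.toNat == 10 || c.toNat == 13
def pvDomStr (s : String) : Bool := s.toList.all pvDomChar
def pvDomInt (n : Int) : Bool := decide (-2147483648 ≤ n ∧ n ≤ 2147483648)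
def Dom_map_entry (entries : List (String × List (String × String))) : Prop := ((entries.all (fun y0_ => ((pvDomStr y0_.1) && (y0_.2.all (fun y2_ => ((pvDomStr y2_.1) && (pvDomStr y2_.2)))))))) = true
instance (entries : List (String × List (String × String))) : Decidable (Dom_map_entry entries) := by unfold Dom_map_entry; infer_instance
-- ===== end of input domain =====

-- B groups by first collecting the distinct image names in first-occurrence order and then filtering
-- the value list per name, instead of A's single hash-insert-and-append pass; same return value.

-- v['image_name'] on the inner dict v (first match; none = KeyError, excluded by Pre_)
def pvIdOf (v : List (String × String)) : Option String :=
  (PySem.Dict.mk v).get? "image_name"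

-- ===== PORT A =====
-- the loop body of A: conditional insert of {'meta_data': []}, then append v to entry_map[id]['meta_data']
def pvStepA (m : PySem.Dict String (PySem.Dict String (List (List (String × String)))))
    (kv : String × List (String × String)) :
    PySem.Dict String (PySem.Dict String (List (List (String × String)))) :=
  match pvIdOf kv.2 with
  | none => m   -- Python raises KeyError here; such inputs are outside Pre_
  | some imageId =>
      let m1 := if m.contains imageId then m
                else m.insert imageId (PySem.Dict.empty.insert "meta_data" [])
      m1.modify imageId PySem.Dict.empty
        (fun d => d.modify "meta_data" [] (fun l => l ++ [kv.2]))

def map_entry (entries : List (String × List (String × String))) : List (String × List (String × List (List (String × String)))) :=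
  ((entries.foldl pvStepA PySem.Dict.empty).items).map (fun p => (p.1, p.2.items))

-- ===== PORT B =====
def map_entry_alt (entries : List (String × List (String × String))) : List (String × List (String × List (List (String × String)))) :=
  let vals := entries.map (·.2)
  let names := vals.foldl (fun ns v =>
      match pvIdOf v with
      | none => ns   -- Python raises KeyError here; such inputs are outside Pre_
      | some n => if n ∈ ns then ns else ns ++ [n]) []
  names.map (fun n => (n, [("meta_data", vals.filter (fun v => pvIdOf v == some n))]))

-- ===== PRECONDITION & SPEC =====
-- exactly the inputs on which the Python A returns: every value dict carries the key 'image_name'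
def Pre_map_entry (entries : List (String × List (String × String))) : Prop :=
  ∀ kv ∈ entries, kv.2.any (fun r => r.1 == "image_name") = true
instance (entries : List (String × List (String × String))) : Decidable (Pre_map_entry entries) := by unfold Pre_map_entry; infer_instance

def pvWitness_map_entry : (List (String × List (String × String))) :=
  [("q1", [("image_name", "img1.jpg"), ("question", "what?")]),
   ("q2", [("image_name", "img1.jpg")])]

def Spec_map_entry (entries : List (String × List (String × String))) (out : List (String × List (String × List (List (String × String))))) : Prop := out = map_entry_alt entries
instance (entries : List (String × List (String × String))) (out : List (String × List (String × List (List (String × String))))) : Decidable (Spec_map_entry entries out) := by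
  unfold Spec_map_entry
  letI d1 : DecidableEq (List (String × String)) := inferInstance
  letI d2 : DecidableEq (List (List (String × String))) := inferInstance
  letI d3 : DecidableEq (String × List (List (String × String))) := inferInstance
  letI d4 : DecidableEq (List (String × List (List (String × String)))) := inferInstance
  letI d5 : DecidableEq (String × List (String × List (List (String × String)))) := inferInstance
  letI d6 : DecidableEq (List (String × List (String × List (List (String × String))))) := inferInstance
  infer_instance

-- ===== CLAIM (what is proved, stated in full; the proofs are below) =====
def Claim_equal_map_entry : Prop := ∀ (entries : List (String × List (String × String))), Dom_map_entry entries → Pre_map_entry entries → Spec_map_entry entries (map_entry entries)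

-- ===== LEMMAS AND PROOFS =====

-- the names accumulated by B's first loop, continued from ns
def pvAddNames (ns : List String) (l : List (String × List (String × String))) : List String :=
  l.foldl (fun ns kv =>
      match pvIdOf kv.2 with
      | none => ns
      | some n => if n ∈ ns then ns else ns ++ [n]) ns

-- the group B builds for name n out of the suffix l
def pvGrp (l : List (String × List (String × String))) (n : String) : List (List (String × String)) :=
  (l.map (·.2)).filter (fun v => pvIdOf v == some n)

-- the canonical shape A's accumulator keeps: one row per name, inner dict {'meta_data': g n}
def pvShape (ns : List String) (g : String → List (List (String × String))) :
    PySem.Dict String (PySem.Dict String (List (List (String × String)))) :=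
  PySem.Dict.mk (ns.map (fun n => (n, PySem.Dict.mk [("meta_data", g n)])))

lemma pvShape_contains (ns : List String) (g : String → List (List (String × String))) (i : String) :
    (pvShape ns g).contains i = decide (i ∈ ns) := by
  induction ns with
  | nil => simp [pvShape, PySem.Dict.contains]
  | cons a t ih =>
      simp only [pvShape, PySem.Dict.contains] at ih ⊢
      by_cases ha : a = i
      · simp [ha, ih]
      · simp [ha, ih, Ne.symm ha]

lemma pvShape_getD (ns : List String) (g : String → List (List (String × String))) (i : String)
    (h : i ∈ ns) :
    (pvShape ns g).getD i PySem.Dict.empty = PySem.Dict.mk [("meta_data", g i)] := by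
  induction ns with
  | nil => simp at h
  | cons a t ih =>
      rcases List.mem_cons.mp h with h1 | h1
      · subst h1
        simp [pvShape, PySem.Dict.getD, PySem.Dict.get?]
      · by_cases ha : a = i
        · subst ha
          simp [pvShape, PySem.Dict.getD, PySem.Dict.get?]
        · have := ih h1
          simpa [pvShape, PySem.Dict.getD, PySem.Dict.get?, ha] using this

-- inserting at a name already present rewrites that name's row, pointwise over the shape
lemma pvShape_insert_mem (ns : List String) (g : String → List (List (String × String))) (i : String)
    (w : PySem.Dict String (List (List (String × String)))) (h : i ∈ ns) :
    (pvShape ns g).insert i w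
      = PySem.Dict.mk (ns.map (fun n => if n = i then (i, w) else (n, PySem.Dict.mk [("meta_data", g n)]))) := by
  have hc : (pvShape ns g).contains i = true := by simp [pvShape_contains, h]
  simp only [PySem.Dict.insert, hc, if_true]
  congr 1
  simp only [pvShape, List.map_map]
  apply List.map_congr_left
  intro n _
  by_cases hn : n = i <;> simp [Function.comp, hn]

-- inserting a fresh name appends its row
lemma pvShape_insert_new (ns : List String) (g : String → List (List (String × String))) (i : String)
    (w : PySem.Dict String (List (List (String × String)))) (h : i ∉ ns) :
    (pvShape ns g).insert i w
      = PySem.Dict.mk (ns.map (fun n => (n, PySem.Dict.mk [("meta_data", g n)])) ++ [(i, w)]) := by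
  have hc : (pvShape ns g).contains i = false := by simp [pvShape_contains, h]
  simp only [PySem.Dict.insert]
  rw [if_neg (by rw [hc]; simp)]
  simp [pvShape]

-- the inner-dict update in insert/getD form (what Dict.modify unfolds to)
lemma pvInner_step (x : List (List (String × String))) (v : List (String × String)) :
    (PySem.Dict.mk [("meta_data", x)]).insert "meta_data"
        ((PySem.Dict.mk [("meta_data", x)]).getD "meta_data" [] ++ [v])
      = PySem.Dict.mk [("meta_data", x ++ [v])] := by
  simp [PySem.Dict.insert, PySem.Dict.contains, PySem.Dict.getD, PySem.Dict.get?]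

-- re-mapping a shape's rows pointwise
lemma pvShape_map_congr (ns : List String) (g g' : String → List (List (String × String)))
    (h : ∀ n ∈ ns, g n = g' n) : pvShape ns g = pvShape ns g' := by
  simp only [pvShape]
  congr 1
  apply List.map_congr_left
  intro n hn
  simp [h n hn]

-- main invariant: running A's loop from the canonical shape yields the canonical shape for the
-- extended name list, each group extended by the matching values of the suffix
lemma pvFold_inv (l : List (String × List (String × String))) :
    ∀ (ns : List String) (g : String → List (List (String × String))),
    (∀ kv ∈ l, pvIdOf kv.2 ≠ none) →
    (l.foldl pvStepA (pvShape ns g))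
      = pvShape (pvAddNames ns l)
          (fun n => (if n ∈ ns then g n else []) ++ pvGrp l n) := by
  induction l with
  | nil =>
      intro ns g _
      simp only [List.foldl_nil, pvAddNames, List.foldl_nil]
      apply pvShape_map_congr
      intro n hn
      simp [pvGrp, hn]
  | cons kv l ih =>
      intro ns g hpre
      have hkv : pvIdOf kv.2 ≠ none := hpre kv (List.mem_cons_self ..)
      obtain ⟨i, hi⟩ := Option.ne_none_iff_exists'.mp hkv
      have hpre' : ∀ p ∈ l, pvIdOf p.2 ≠ none := fun p hp => hpre p (List.mem_cons_of_mem _ hp)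
      have hAdd : pvAddNames ns (kv :: l)
          = pvAddNames (if i ∈ ns then ns else ns ++ [i]) l := by
        by_cases hmem : i ∈ ns <;> simp [pvAddNames, hi, hmem]
      by_cases hmem : i ∈ ns
      · -- existing name: skip the insert, append to its meta_data
        have hstep : pvStepA (pvShape ns g) kv
            = pvShape ns (fun n => if n = i then g i ++ [kv.2] else g n) := by
          simp only [pvStepA, hi, pvShape_contains, hmem, decide_true, if_true,
            PySem.Dict.modify, pvShape_getD ns g i hmem, pvInner_step]
          rw [pvShape_insert_mem ns g i _ hmem]
          simp only [pvShape]
          congr 1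
          apply List.map_congr_left
          intro n _
          by_cases hn : n = i <;> simp [hn]
        rw [List.foldl_cons, hstep, ih ns _ hpre', hAdd, if_pos hmem]
        apply pvShape_map_congr
        intro n _
        by_cases hn : n = i
        · subst hn
          simp [hmem, pvGrp, hi]
        · simp [hn, pvGrp, hi, Ne.symm hn]
      · -- fresh name: insert an empty group, then append to it
        have hins : PySem.Dict.empty.insert "meta_data" ([] : List (List (String × String)))
            = PySem.Dict.mk [("meta_data", [])] := by
          simp [PySem.Dict.insert, PySem.Dict.empty, PySem.Dict.contains]
        have hmem' : i ∈ ns ++ [i] := by simp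
        have hsh : (pvShape ns g).insert i (PySem.Dict.mk [("meta_data", [])])
            = pvShape (ns ++ [i]) (fun n => if n = i then [] else g n) := by
          rw [pvShape_insert_new ns g i _ hmem]
          have h1 : ns.map (fun n => (n, PySem.Dict.mk [("meta_data", g n)]))
              = ns.map (fun n => (n, PySem.Dict.mk [("meta_data", if n = i then [] else g n)])) :=
            List.map_congr_left (fun n hn => by
              have hne : n ≠ i := fun h => hmem (h ▸ hn)
              simp [hne])
          simp [pvShape, h1]
        have hstep : pvStepA (pvShape ns g) kv
            = pvShape (ns ++ [i]) (fun n => if n = i then [kv.2] else g n) := by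
          have hgd := pvShape_getD (ns ++ [i]) (fun n => if n = i then [] else g n) i hmem'
          simp at hgd
          simp only [pvStepA, hi, pvShape_contains, hmem, decide_false, Bool.false_eq_true,
            if_false, hins, hsh, PySem.Dict.modify, hgd, pvInner_step, List.nil_append]
          rw [pvShape_insert_mem (ns ++ [i]) _ i _ hmem']
          simp only [pvShape]
          congr 1
          apply List.map_congr_left
          intro n _
          by_cases hn : n = i <;> simp [hn]
        rw [List.foldl_cons, hstep, ih (ns ++ [i]) _ hpre', hAdd, if_neg hmem]
        apply pvShape_map_congr
        intro n _
        by_cases hn : n = i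
        · subst hn
          simp [hmem, pvGrp, hi]
        · have : ¬ (n ∈ ns ++ [i]) → ¬ (n ∈ ns) := by simp [List.mem_append]; tauto
          by_cases hns : n ∈ ns
          · simp [hn, hns, pvGrp, hi, Ne.symm hn]
          · have : n ∉ ns ++ [i] := by simp [List.mem_append, hns, hn]
            simp [this, hns, pvGrp, hi, Ne.symm hn]

lemma pvPre_ne_none (entries : List (String × List (String × String)))
    (h : Pre_map_entry entries) : ∀ kv ∈ entries, pvIdOf kv.2 ≠ none := by
  intro kv hkv
  have := h kv hkv
  simp only [pvIdOf, PySem.Dict.get?, ne_eq, Option.map_eq_none_iff, List.find?_eq_none]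
  intro hall
  rcases List.any_eq_true.mp this with ⟨r, hr, hbeq⟩
  exact absurd hbeq (by simpa using hall r hr)

-- ===== VERDICT (by name: the statement is the Claim_ definition above) =====
theorem map_entry_spec : Claim_equal_map_entry := by
  intro entries _ hpre
  show map_entry entries = map_entry_alt entries
  have h0 : (PySem.Dict.empty : PySem.Dict String (PySem.Dict String (List (List (String × String)))))
      = pvShape [] (fun _ => []) := rfl
  rw [map_entry, h0, pvFold_inv entries [] _ (pvPre_ne_none entries hpre)]
  simp only [map_entry_alt, pvShape, List.map_map]
  have hnames : pvAddNames [] entries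
      = (entries.map (·.2)).foldl (fun ns v =>
          match pvIdOf v with
          | none => ns
          | some n => if n ∈ ns then ns else ns ++ [n]) [] := by
    simp [pvAddNames, List.foldl_map]
  rw [← hnames]
  apply List.map_congr_left
  intro n _
  simp [pvGrp]
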